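-- pv_equiv track=rewrite | github.com/SerezhaK/anonymization-of-data | spb/phones_obez.py | obez_phones
-- ===== SOURCE A (Python) =====
-- mtc = ['981', '911', '989', '986', '958', '932', '933', '981', '939', '984', '980', '994', '992', '988', '930', '967',
--        '924', '968', '936', '938', '985', '999', '983', '969', '902', '989', '993', '931', '923', '904']
--
-- megaphone = ['921', '931', '999', '929', '930', '933', '937', '932', '939', '923', '924', '958', '999', '996', '995']
--
-- tele2 = ['952', '953', '904', '950', '901', '951', '996', '994', '992', '900', '991', '902', '993', '995', '991', '993',
--          '958', '939', '930', '995', '980', '932', '939', '977', '996', '958']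
--
-- beeline = ['965', '966', '969', '905', '964', '967', '960', '962', '963', '906', '961', '909', '968', '903']
--
-- def obez_phones(phones):
--     phones_obez = []
--     for x in range(len(phones)):
--         if phones[x][1:4] in mtc:
--             phones_obez.append('МТС')
--         elif phones[x][1:4] in megaphone:
--             phones_obez.append('МЕГАФОН')
--         elif phones[x][1:4] in tele2:
--             phones_obez.append('ТЕЛЕ2')
--         elif phones[x][1:4] in beeline:
--             phones_obez.append('Билайн')
--     return phones_obez
-- ===== SOURCE B (Python) =====
-- mtc = ['981', '911', '989', '986', '958', '932', '933', '981', '939', '984', '980', '994', '992', '988', '930', '967',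
--        '924', '968', '936', '938', '985', '999', '983', '969', '902', '989', '993', '931', '923', '904']
--
-- megaphone = ['921', '931', '999', '929', '930', '933', '937', '932', '939', '923', '924', '958', '999', '996', '995']
--
-- tele2 = ['952', '953', '904', '950', '901', '951', '996', '994', '992', '900', '991', '902', '993', '995', '991', '993',
--          '958', '939', '930', '995', '980', '932', '939', '977', '996', '958']
--
-- beeline = ['965', '966', '969', '905', '964', '967', '960', '962', '963', '906', '961', '909', '968', '903']
--
-- # Every carrier prefix is '9' + two digits, so a dense 100-slot table indexed by the
-- # last two digits replaces the four membership scans; filled in reverse priority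
-- # order so that higher-priority carriers overwrite shared slots (mtc last wins).
-- table = [None] * 100
-- for name, lst in (('Билайн', beeline), ('ТЕЛЕ2', tele2), ('МЕГАФОН', megaphone), ('МТС', mtc)):
--     for p in lst:
--         table[int(p[1:])] = name
--
--
-- def _lookup(key):
--     if len(key) == 3 and key[0] == '9' and key[1:].isdigit():
--         return table[int(key[1:])]
--     return None
--
--
-- def obez_phones(phones):
--     labels = []
--     for phone in phones:
--         name = _lookup(phone[1:4])
--         if name is not None:
--             labels.append(name)
--     return labels
-- ===== Notes on version B (the rewrite author's own statement) =====
-- stated objective: faster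
-- what changed: Replaces the 4-way elif membership cascade (a linear scan of up to four prefix lists per phone) with a dense 100-slot array built once and indexed arithmetically by the two digits after the leading '9' (filled in reverse priority order so mtc, inserted last, wins shared slots), one O(1) array access per phone.
import Mathlib
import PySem

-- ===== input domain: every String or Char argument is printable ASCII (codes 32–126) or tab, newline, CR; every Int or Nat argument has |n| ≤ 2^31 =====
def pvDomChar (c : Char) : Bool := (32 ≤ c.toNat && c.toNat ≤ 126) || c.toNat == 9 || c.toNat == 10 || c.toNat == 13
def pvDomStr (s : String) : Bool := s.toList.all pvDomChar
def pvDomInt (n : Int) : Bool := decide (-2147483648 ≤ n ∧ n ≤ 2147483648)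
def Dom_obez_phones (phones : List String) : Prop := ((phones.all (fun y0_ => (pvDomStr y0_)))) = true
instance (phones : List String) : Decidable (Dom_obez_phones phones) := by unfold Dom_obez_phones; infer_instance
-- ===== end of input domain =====

-- B replaces A's four-way elif membership cascade by a dense 100-slot table indexed by the
-- two digits after the leading '9' (all carrier prefixes are '9'+two digits), one array lookup per phone (objective: faster).


-- ===== PORT A =====
def mtcL : List String := ["981", "911", "989", "986", "958", "932", "933", "981", "939", "984", "980", "994", "992", "988", "930", "967",
  "924", "968", "936", "938", "985", "999", "983", "969", "902", "989", "993", "931", "923", "904"]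

def megaphoneL : List String := ["921", "931", "999", "929", "930", "933", "937", "932", "939", "923", "924", "958", "999", "996", "995"]

def tele2L : List String := ["952", "953", "904", "950", "901", "951", "996", "994", "992", "900", "991", "902", "993", "995", "991", "993",
  "958", "939", "930", "995", "980", "932", "939", "977", "996", "958"]

def beelineL : List String := ["965", "966", "969", "905", "964", "967", "960", "962", "963", "906", "961", "909", "968", "903"]

def obez_phones (phones : List String) : List String :=
  (PySem.List.pyRange 0 (PySem.List.len phones) 1).foldl (fun acc x =>
    if PySem.Str.slice (PySem.List.pyGetD phones x "") (some 1) (some 4) ∈ mtcL then acc ++ ["МТС"]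
    else if PySem.Str.slice (PySem.List.pyGetD phones x "") (some 1) (some 4) ∈ megaphoneL then acc ++ ["МЕГАФОН"]
    else if PySem.Str.slice (PySem.List.pyGetD phones x "") (some 1) (some 4) ∈ tele2L then acc ++ ["ТЕЛЕ2"]
    else if PySem.Str.slice (PySem.List.pyGetD phones x "") (some 1) (some 4) ∈ beelineL then acc ++ ["Билайн"]
    else acc) []

-- ===== PORT B =====
-- Source B's module-level table: 100 slots indexed by int(p[1:]), filled in reverse priority order
def table100 : List (Option String) :=
  [("Билайн", beelineL), ("ТЕЛЕ2", tele2L), ("МЕГАФОН", megaphoneL), ("МТС", mtcL)].foldl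
    (fun t pr => pr.2.foldl (fun t p =>
        match PySem.Int.ofStr? (PySem.Str.slice p (some 1) none) with
        | some i => t.set i.toNat (some pr.1)
        | none => t) t)
    (List.replicate 100 none)

-- Source B's _lookup helper
def lookupB (key : String) : Option String :=
  if PySem.Str.len key == 3 && PySem.Str.pyGet? key 0 == some '9'
      && PySem.Str.strIsdigit (PySem.Str.slice key (some 1) none) then
    match PySem.Int.ofStr? (PySem.Str.slice key (some 1) none) with
    | some i => PySem.List.pyGetD table100 i none
    | none => none
  else none

def obez_phones_alt (phones : List String) : List String :=
  phones.foldl (fun labels phone =>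
    match lookupB (PySem.Str.slice phone (some 1) (some 4)) with
    | some name => labels ++ [name]
    | none => labels) []

-- ===== PRECONDITION & SPEC =====
def Spec_obez_phones (phones : List String) (out : List String) : Prop := out = obez_phones_alt phones
instance (phones : List String) (out : List String) : Decidable (Spec_obez_phones phones out) := by unfold Spec_obez_phones; infer_instance

-- ===== CLAIM (what is proved, stated in full; the proofs are below) =====
def Claim_equal_obez_phones : Prop := ∀ (phones : List String), Dom_obez_phones phones → Spec_obez_phones phones (obez_phones phones)

-- ===== LEMMAS AND PROOFS =====

-- A's elif cascade as an Option, for a given 3-char key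
def cascade (s : String) : Option String :=
  if s ∈ mtcL then some "МТС"
  else if s ∈ megaphoneL then some "МЕГАФОН"
  else if s ∈ tele2L then some "ТЕЛЕ2"
  else if s ∈ beelineL then some "Билайн"
  else none

-- the fully evaluated table (checked against table100 below)
def tableLit : List (Option String) := [some "ТЕЛЕ2", some "ТЕЛЕ2", some "МТС", some "Билайн", some "МТС", some "Билайн", some "Билайн", none, none, some "Билайн", none, some "МТС", none, none, none, none, none, none, none, none, none, some "МЕГАФОН", none, some "МТС", some "МТС", none, none, none, none, some "МЕГАФОН", some "МТС", some "МТС", some "МТС", some "МТС", none, none, some "МТС", some "МЕГАФОН", some "МТС", some "МТС", none, none, none, none, none, none, none, none, none, none, some "ТЕЛЕ2", some "ТЕЛЕ2", some "ТЕЛЕ2", some "ТЕЛЕ2", none, none, none, none, some "МТС", none, some "Билайн", some "Билайн", some "Билайн", some "Билайн", some "Билайн", some "Билайн", some "Билайн", some "МТС", some "МТС", some "МТС", none, none, none, none, none, none, none, some "ТЕЛЕ2", none, none, some "МТС", some "МТС", none, some "МТС", some "МТС", some "МТС", some "МТС", none, some "МТС", some "МТС", none, some "ТЕЛЕ2", some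 "МТС", some "МТС", some "МТС", some "МЕГАФОН", some "МЕГАФОН", none, none, some "МТС"]

set_option maxRecDepth 100000 in
lemma table100_eq : table100 = tableLit := by decide

-- lookupB with the table replaced by its literal value
def lookupLit (key : String) : Option String :=
  if PySem.Str.len key == 3 && PySem.Str.pyGet? key 0 == some '9'
      && PySem.Str.strIsdigit (PySem.Str.slice key (some 1) none) then
    match PySem.Int.ofStr? (PySem.Str.slice key (some 1) none) with
    | some i => PySem.List.pyGetD tableLit i none
    | none => none
  else none

lemma lookupB_eq_lit (key : String) : lookupB key = lookupLit key := by
  unfold lookupB lookupLit; rw [table100_eq]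

def digitChars : List Char := ['0','1','2','3','4','5','6','7','8','9']

lemma isdigit_mem {c : Char} (h : PySem.Chars.isdigit c = true) : c ∈ digitChars := by
  simp [PySem.Chars.isdigit, Char.le_def] at h
  obtain ⟨h1, h2⟩ := h
  have hn1 : 48 ≤ c.toNat := by exact_mod_cast h1
  have hn2 : c.toNat ≤ 57 := by exact_mod_cast h2
  have hc : c = Char.ofNat c.toNat := (Char.ofNat_toNat c).symm
  interval_cases h : c.toNat <;> rw [hc] <;> decide

lemma core (b c : Char) (hb : b ∈ digitChars) (hc : c ∈ digitChars) :
    lookupLit (String.ofList ['9', b, c]) = cascade (String.ofList ['9', b, c]) := by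
  fin_cases hb <;> fin_cases hc <;> decide

-- the shape every carrier prefix has: '9' followed by two digits
def shape3 (p : String) : Bool :=
  match p.toList with
  | [a, b, c] => a == '9' && PySem.Chars.isdigit b && PySem.Chars.isdigit c
  | _ => false

set_option maxRecDepth 4000 in
lemma shape_all : ∀ p ∈ mtcL ++ megaphoneL ++ tele2L ++ beelineL, shape3 p = true := by decide

lemma guard_eq_shape (s : String) :
    (PySem.Str.len s == 3 && PySem.Str.pyGet? s 0 == some '9'
      && PySem.Str.strIsdigit (PySem.Str.slice s (some 1) none)) = shape3 s := by
  rcases hl : s.toList with _ | ⟨a, _ | ⟨b, _ | ⟨c, _ | ⟨d, t⟩⟩⟩⟩ <;>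
    simp [shape3, hl, PySem.Str.len_eq, PySem.Str.pyGet?_eq, PySem.Chars.pyGet?_eq_listPyGet?,
      PySem.List.pyGet?_zero, PySem.Str.strIsdigit_eq, PySem.Str.toList_slice,
      PySem.Chars.slice_eq_listSlice, PySem.List.slice_from, PySem.Chars.strIsdigit,
      Bool.and_assoc]
  intros; omega

lemma lookupB_eq_cascade (s : String) : lookupB s = cascade s := by
  rw [lookupB_eq_lit]
  by_cases h : shape3 s = true
  · rcases hl : s.toList with _ | ⟨a, _ | ⟨b, _ | ⟨c, _ | ⟨d, t⟩⟩⟩⟩ <;> simp [shape3, hl] at h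
    obtain ⟨⟨ha, hb⟩, hc⟩ := h
    have hs : s = String.ofList ['9', b, c] := by
      rw [← String.ofList_toList (s := s), hl, ha]
    rw [hs]
    exact core b c (isdigit_mem hb) (isdigit_mem hc)
  · have hnm : ∀ p ∈ mtcL ++ megaphoneL ++ tele2L ++ beelineL, s ≠ p := by
      intro p hp he; exact h (he ▸ shape_all p hp)
    rw [Bool.not_eq_true] at h
    unfold lookupLit cascade
    rw [guard_eq_shape, h]
    have m1 : s ∉ mtcL := fun hm => hnm s (by simp [hm]) rfl
    have m2 : s ∉ megaphoneL := fun hm => hnm s (by simp [hm]) rfl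
    have m3 : s ∉ tele2L := fun hm => hnm s (by simp [hm]) rfl
    have m4 : s ∉ beelineL := fun hm => hnm s (by simp [hm]) rfl
    simp [m1, m2, m3, m4]

-- ===== VERDICT =====
theorem obez_phones_spec : Claim_equal_obez_phones := by
  intro phones _
  show obez_phones phones = obez_phones_alt phones
  unfold obez_phones obez_phones_alt
  rw [PySem.List.foldl_pyRange_zero_pyGetD phones ""
    (fun acc p =>
      if PySem.Str.slice p (some 1) (some 4) ∈ mtcL then acc ++ ["МТС"]
      else if PySem.Str.slice p (some 1) (some 4) ∈ megaphoneL then acc ++ ["МЕГАФОН"]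
      else if PySem.Str.slice p (some 1) (some 4) ∈ tele2L then acc ++ ["ТЕЛЕ2"]
      else if PySem.Str.slice p (some 1) (some 4) ∈ beelineL then acc ++ ["Билайн"]
      else acc) []]
  apply PySem.List.foldl_congr_mem
  intro acc phone _
  rw [lookupB_eq_cascade]
  unfold cascade
  split_ifs <;> simp
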